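-- pv_equiv track=rewrite | github.com/pypi-data/pypi-mirror-361 | packages/pyvvisf/pyvvisf-0.6.0.tar.gz/pyvvisf-0.6.0/src/pyvvisf/shader_compiler.py | find_insertion_point
-- ===== SOURCE A (Python) =====
-- from typing import List, Optional, Any
--
-- def find_insertion_point(lines: List[str]) -> int:
--     """Find the best insertion point for uniform declarations."""
--     insert_idx = 0
--     for i, line in enumerate(lines):
--         if line.strip().startswith('#version'):
--             insert_idx = i + 1
--         elif line.strip().startswith('out vec4 fragColor;'):
--             insert_idx = i + 1
--     return insert_idx
-- ===== SOURCE B (Python) =====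
-- def find_insertion_point(lines):
--     """Find the best insertion point for uniform declarations."""
--     for i in range(len(lines) - 1, -1, -1):
--         s = lines[i].strip()
--         if s.startswith('#version') or s.startswith('out vec4 fragColor;'):
--             return i + 1
--     return 0
-- ===== Notes on version B (the rewrite author's own statement) =====
-- stated objective: idiomatic
-- what changed: Replaces the full forward sweep that keeps overwriting insert_idx with a backward scan that returns i+1 at the first matching line seen from the end (the last match), short-circuiting instead of always visiting every line.
import Mathlib
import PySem

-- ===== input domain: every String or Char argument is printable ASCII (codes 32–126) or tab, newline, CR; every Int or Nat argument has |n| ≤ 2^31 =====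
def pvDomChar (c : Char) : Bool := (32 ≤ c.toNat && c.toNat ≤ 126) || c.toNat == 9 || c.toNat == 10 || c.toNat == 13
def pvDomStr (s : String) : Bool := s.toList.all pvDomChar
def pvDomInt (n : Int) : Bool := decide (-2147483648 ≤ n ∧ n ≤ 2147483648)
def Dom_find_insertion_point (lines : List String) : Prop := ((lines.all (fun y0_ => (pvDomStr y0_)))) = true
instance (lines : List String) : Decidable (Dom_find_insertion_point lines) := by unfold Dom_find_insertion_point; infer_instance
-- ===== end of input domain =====

-- B replaces A's full forward sweep (overwriting insert_idx on each match) with a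
-- backward scan returning i+1 at the first match from the end; same result, idiomatic early exit.


-- ===== PORT A =====
-- A's for-loop over enumerate(lines): index i and accumulator insert_idx, branches in source order
def findInsGo (ls : List String) (i : Int) (acc : Int) : Int :=
  match ls with
  | [] => acc
  | line :: rest =>
    findInsGo rest (i + 1)
      (if PySem.Str.startswith (PySem.Str.strip line) "#version" then i + 1
       else if PySem.Str.startswith (PySem.Str.strip line) "out vec4 fragColor;" then i + 1
       else acc)

def find_insertion_point (lines : List String) : Int := findInsGo lines 0 0

-- ===== PORT B =====
-- B walks the lines back to front (Python's range(len-1,-1,-1)): first match from the end wins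
def findInsRev (revls : List String) : Int :=
  match revls with
  | [] => 0
  | line :: earlier =>
    let s := PySem.Str.strip line
    if PySem.Str.startswith s "#version" || PySem.Str.startswith s "out vec4 fragColor;" then
      (earlier.length : Int) + 1
    else findInsRev earlier

def find_insertion_point_alt (lines : List String) : Int := findInsRev lines.reverse

-- ===== PRECONDITION & SPEC =====
def Spec_find_insertion_point (lines : List String) (out : Int) : Prop := out = find_insertion_point_alt lines
instance (lines : List String) (out : Int) : Decidable (Spec_find_insertion_point lines out) := by unfold Spec_find_insertion_point; infer_instance

-- ===== CLAIM (what is proved, stated in full; the proofs are below) =====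
def Claim_equal_find_insertion_point : Prop := ∀ (lines : List String), Dom_find_insertion_point lines → Spec_find_insertion_point lines (find_insertion_point lines)

-- ===== LEMMAS AND PROOFS =====

def pvMatches (line : String) : Bool :=
  PySem.Str.startswith (PySem.Str.strip line) "#version" ||
  PySem.Str.startswith (PySem.Str.strip line) "out vec4 fragColor;"

theorem findInsGo_append (xs : List String) (x : String) (i acc : Int) :
    findInsGo (xs ++ [x]) i acc
      = if pvMatches x then i + xs.length + 1 else findInsGo xs i acc := by
  induction xs generalizing i acc with
  | nil =>
    simp [findInsGo, pvMatches]
    split_ifs <;> simp_all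
  | cons y ys ih =>
    simp only [List.cons_append, findInsGo, ih, List.length_cons]
    split_ifs <;> push_cast <;> ring_nf

theorem go_eq_rev (lines : List String) :
    findInsGo lines 0 0 = findInsRev lines.reverse := by
  induction lines using List.reverseRecOn with
  | nil => rfl
  | append_singleton xs x ih =>
    rw [findInsGo_append, List.reverse_append]
    simp only [List.reverse_singleton, List.singleton_append, findInsRev, List.length_reverse]
    by_cases h : pvMatches x
    · rw [if_pos h, if_pos (by simpa [pvMatches] using h)]
      ring
    · rw [if_neg h, if_neg (by simpa [pvMatches] using h), ih]

-- ===== VERDICT (by name: the statement is the Claim_ definition above) =====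
theorem find_insertion_point_spec : Claim_equal_find_insertion_point := by
  intro lines _
  unfold Spec_find_insertion_point find_insertion_point find_insertion_point_alt
  exact go_eq_rev lines
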